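-- pv_equiv track=rewrite | github.com/pereztomer/mrf-masters | test_Recon/models/unet_3d.py | _calculate_temporal_pooling
-- ===== SOURCE A (Python) =====
-- def _calculate_temporal_pooling(time_steps):
--     """Calculate appropriate pooling kernels to preserve temporal information"""
--     pools = []
--     current_size = time_steps
--
--     for i in range(4):  # 4 downsampling layers
--         if current_size >= 4:
--             # Pool temporally
--             pools.append((2, 2, 2))
--             current_size = current_size // 2
--         elif current_size >= 2:
--             # Pool less aggressively in temporal dimension
--             pools.append((1, 2, 2))
--         else:
--             # Don't pool temporally anymore
--             pools.append((1, 2, 2))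
--
--     return pools
-- ===== SOURCE B (Python) =====
-- def _calculate_temporal_pooling(time_steps):
--     """Calculate appropriate pooling kernels to preserve temporal information"""
--     # Closed form: the loop in the original pools temporally exactly while the
--     # (halved) size stays >= 4, i.e. once per threshold 4, 8, 16, 32 reached.
--     k = sum(time_steps >= t for t in (4, 8, 16, 32))
--     return [(2, 2, 2)] * k + [(1, 2, 2)] * (4 - k)
-- ===== Notes on version B (the rewrite author's own statement) =====
-- stated objective: simpler
-- what changed: Replaces the branch-append-and-halve loop over the downsampling layers by a closed-form count of how many fixed power-of-two thresholds the input reaches (no division at all) followed by list replication.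
import Mathlib
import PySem

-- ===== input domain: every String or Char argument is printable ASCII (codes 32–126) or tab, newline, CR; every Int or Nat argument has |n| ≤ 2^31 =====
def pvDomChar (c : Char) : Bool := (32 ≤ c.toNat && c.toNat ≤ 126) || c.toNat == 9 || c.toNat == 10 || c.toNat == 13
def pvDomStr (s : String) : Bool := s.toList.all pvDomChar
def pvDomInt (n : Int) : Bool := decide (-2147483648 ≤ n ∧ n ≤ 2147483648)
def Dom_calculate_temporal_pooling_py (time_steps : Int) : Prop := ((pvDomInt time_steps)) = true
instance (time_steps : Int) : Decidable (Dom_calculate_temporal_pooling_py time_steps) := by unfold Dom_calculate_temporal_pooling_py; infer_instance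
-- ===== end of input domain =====

-- B replaces the branch-append-and-halve loop by a closed-form threshold count plus list replication (objective: simpler).

-- ===== PORT A =====
-- for i in range(4): branch on current_size, append a kernel, maybe halve current_size
def calculate_temporal_pooling_py (time_steps : Int) : List (Int × Int × Int) :=
  let init : List (Int × Int × Int) × Int := ([], time_steps)
  let fin := (PySem.List.pyRange 0 4 1).foldl
    (fun (st : List (Int × Int × Int) × Int) (_ : Int) =>
      if st.2 ≥ 4 then
        (st.1 ++ [(2, 2, 2)], PySem.Int.floordiv st.2 2)
      else if st.2 ≥ 2 then
        (st.1 ++ [(1, 2, 2)], st.2)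
      else
        (st.1 ++ [(1, 2, 2)], st.2)) init
  fin.1

-- ===== PORT B =====
-- k = sum(time_steps >= t for t in (4, 8, 16, 32)); [(2,2,2)]*k + [(1,2,2)]*(4-k)
def calculate_temporal_pooling_py_alt (time_steps : Int) : List (Int × Int × Int) :=
  let k : Nat := ([4, 8, 16, 32] : List Int).foldl
    (fun acc t => acc + (if time_steps ≥ t then 1 else 0)) 0
  List.replicate k (2, 2, 2) ++ List.replicate (4 - k) (1, 2, 2)

-- ===== PRECONDITION & SPEC =====
def Spec_calculate_temporal_pooling_py (time_steps : Int) (out : List (Int × Int × Int)) : Prop := out = calculate_temporal_pooling_py_alt time_steps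
instance (time_steps : Int) (out : List (Int × Int × Int)) : Decidable (Spec_calculate_temporal_pooling_py time_steps out) := by unfold Spec_calculate_temporal_pooling_py; infer_instance

-- ===== CLAIM (what is proved, stated in full; the proofs are below) =====
def Claim_equal_calculate_temporal_pooling_py : Prop := ∀ (time_steps : Int), Dom_calculate_temporal_pooling_py time_steps → Spec_calculate_temporal_pooling_py time_steps (calculate_temporal_pooling_py time_steps)

-- ===== LEMMAS AND PROOFS =====

-- ===== VERDICT (by name: the statement is the Claim_ definition above) =====
theorem calculate_temporal_pooling_py_spec : Claim_equal_calculate_temporal_pooling_py := by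
  intro ts _
  unfold Spec_calculate_temporal_pooling_py
  have hr : PySem.List.pyRange 0 4 1 = [0, 1, 2, 3] := by decide
  have hfd : ∀ a : Int, a.fdiv 2 = a / 2 := fun a => by rw [Int.fdiv_eq_ediv]; omega
  rcases lt_or_ge ts 4 with h | h
  · have h1 : ¬ (ts ≥ 4) := by omega
    have h2 : ¬ (ts ≥ 8) := by omega
    have h3 : ¬ (ts ≥ 16) := by omega
    have h4 : ¬ (ts ≥ 32) := by omega
    simp [calculate_temporal_pooling_py, calculate_temporal_pooling_py_alt, hr, h1, h2, h3, h4]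
  · rcases lt_or_ge ts 8 with h' | h'
    · have h1 : ts ≥ 4 := by omega
      have h2 : ¬ (ts / 2 ≥ 4) := by omega
      have h3 : ¬ (ts ≥ 8) := by omega
      have h4 : ¬ (ts ≥ 16) := by omega
      have h5 : ¬ (ts ≥ 32) := by omega
      simp [calculate_temporal_pooling_py, calculate_temporal_pooling_py_alt, hr,
        PySem.Int.floordiv, hfd, h1, h2, h3, h4, h5]
    · rcases lt_or_ge ts 16 with h'' | h''
      · have h1 : ts ≥ 4 := by omega
        have h2 : ts / 2 ≥ 4 := by omega
        have h3 : ¬ (ts / 2 / 2 ≥ 4) := by omega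
        have h4 : ts ≥ 8 := by omega
        have h5 : ¬ (ts ≥ 16) := by omega
        have h6 : ¬ (ts ≥ 32) := by omega
        simp [calculate_temporal_pooling_py, calculate_temporal_pooling_py_alt, hr,
          PySem.Int.floordiv, hfd, h1, h2, h3, h4, h5, h6]
      · rcases lt_or_ge ts 32 with h3 | h3
        · have h1 : ts ≥ 4 := by omega
          have h2 : ts / 2 ≥ 4 := by omega
          have h5 : ts / 2 / 2 ≥ 4 := by omega
          have h6 : ¬ (ts / 2 / 2 / 2 ≥ 4) := by omega
          have h7 : ts ≥ 8 := by omega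
          have h8 : ts ≥ 16 := by omega
          have h9 : ¬ (ts ≥ 32) := by omega
          simp [calculate_temporal_pooling_py, calculate_temporal_pooling_py_alt, hr,
            PySem.Int.floordiv, hfd, h1, h2, h5, h6, h7, h8, h9]
        · have h1 : ts ≥ 4 := by omega
          have h2 : ts / 2 ≥ 4 := by omega
          have h5 : ts / 2 / 2 ≥ 4 := by omega
          have h6 : ts / 2 / 2 / 2 ≥ 4 := by omega
          have h7 : ts ≥ 8 := by omega
          have h8 : ts ≥ 16 := by omega
          have h9 : ts ≥ 32 := by omega
          simp [calculate_temporal_pooling_py, calculate_temporal_pooling_py_alt, hr,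
            PySem.Int.floordiv, hfd, h1, h2, h5, h6, h7, h8, h9]
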